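-- pv_equiv track=rewrite | github.com/kseniiako/dsa | findDupbinSearch.py | findDupSearch2
-- ===== SOURCE A (Python) =====
-- def findDupSearch2(lst):
--     # in this implementation, we do not pre-sort the
--     # list. Instead, we binary sort the list, examining the mid at
--     # each step. This runs in O(nlogn). So same asymptotic time as
--     # the previous algorithm.
--     start = 1
--     finish = len(lst) - 1
--
--     out = -1
--
--     while start <= finish:
--         mid = (start + finish) // 2
--
--         count = 0
--         for x in lst:
--             if x <= mid:
--                 count += 1
--
--         if count > mid:
--             out = mid
--             finish = mid - 1
--         else:
--             start = mid + 1
--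
--     return out
-- ===== SOURCE B (Python) =====
-- def findDupSearch2(lst):
--     # Same binary search over candidate values, but the count of elements
--     # <= mid is answered in O(1) from a prefix-sum histogram built once.
--     n = len(lst)
--     hist = [0] * (n + 1)
--     for x in lst:
--         b = 0 if x < 0 else (n if x > n else x)
--         hist[b] += 1
--     pref = []
--     s = 0
--     for h in hist:
--         s += h
--         pref.append(s)
--     start, finish, out = 1, n - 1, -1
--     while start <= finish:
--         mid = (start + finish) // 2
--         if pref[mid] > mid:
--             out = mid
--             finish = mid - 1
--         else:
--             start = mid + 1
--     return out
-- ===== Notes on version B (the rewrite author's own statement) =====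
-- stated objective: faster
-- what changed: Instead of rescanning the whole list to count elements <= mid at every binary-search step, B builds a clamped histogram and its prefix sums once and answers each count query in O(1).
import Mathlib
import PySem

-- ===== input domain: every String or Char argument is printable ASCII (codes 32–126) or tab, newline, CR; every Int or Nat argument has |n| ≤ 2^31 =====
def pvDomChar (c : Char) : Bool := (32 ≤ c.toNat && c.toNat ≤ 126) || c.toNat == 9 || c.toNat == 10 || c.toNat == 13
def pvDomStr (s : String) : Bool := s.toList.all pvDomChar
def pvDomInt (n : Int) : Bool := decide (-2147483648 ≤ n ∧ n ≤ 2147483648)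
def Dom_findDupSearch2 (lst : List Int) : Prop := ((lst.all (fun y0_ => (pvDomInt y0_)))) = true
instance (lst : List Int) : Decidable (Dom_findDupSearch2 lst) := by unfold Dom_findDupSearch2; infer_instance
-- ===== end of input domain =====

-- B replaces A's per-iteration O(n) counting scan by a one-pass clamped histogram
-- with prefix sums, answering each binary-search count query in O(1) (objective: faster, asymptotic).

-- ===== PORT A =====
-- the inner 'for x in lst: if x <= mid: count += 1' loop of A
def pvCountLe (lst : List Int) (mid : Int) : Int :=
  lst.foldl (fun c x => if x ≤ mid then c + 1 else c) 0

-- A's while loop; fuel only makes the same computation total (the interval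
-- [start, finish] shrinks each step, so fuel = len(lst)+1 is never exhausted
-- while start ≤ finish).
def pvLoopA (lst : List Int) : Nat → Int → Int → Int → Int
  | 0, _, _, out => out
  | fuel+1, start, finish, out =>
    if start ≤ finish then
      let mid := PySem.Int.floordiv (start + finish) 2
      if pvCountLe lst mid > mid then pvLoopA lst fuel start (mid - 1) mid
      else pvLoopA lst fuel (mid + 1) finish out
    else out

def findDupSearch2 (lst : List Int) : Int :=
  pvLoopA lst (lst.length + 1) 1 ((lst.length : Int) - 1) (-1)

-- ===== PORT B =====
-- b = 0 if x < 0 else (n if x > n else x)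
def pvClamp (n x : Int) : Int := if x < 0 then 0 else if x > n then n else x

-- 'hist[b] += 1' ported with List.set/getD; exact because b = clamp(x) always
-- lies in [0, n] = range of the length-(n+1) list.
def pvHist (lst : List Int) : List Int :=
  lst.foldl (fun h x =>
      let b := (pvClamp (lst.length : Int) x).toNat
      h.set b (h.getD b 0 + 1))
    (List.replicate (lst.length + 1) 0)

-- 's += h; pref.append(s)'
def pvPref (hist : List Int) : List Int × Int :=
  hist.foldl (fun ps h => (ps.1 ++ [ps.2 + h], ps.2 + h)) ([], 0)

-- B's while loop; same fuel note as for A's loop.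
def pvLoopB (pref : List Int) : Nat → Int → Int → Int → Int
  | 0, _, _, out => out
  | fuel+1, start, finish, out =>
    if start ≤ finish then
      let mid := PySem.Int.floordiv (start + finish) 2
      if PySem.List.pyGetD pref mid 0 > mid then pvLoopB pref fuel start (mid - 1) mid
      else pvLoopB pref fuel (mid + 1) finish out
    else out

def findDupSearch2_alt (lst : List Int) : Int :=
  pvLoopB (pvPref (pvHist lst)).1 (lst.length + 1) 1 ((lst.length : Int) - 1) (-1)

-- ===== PRECONDITION & SPEC =====
def Spec_findDupSearch2 (lst : List Int) (out : Int) : Prop := out = findDupSearch2_alt lst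
instance (lst : List Int) (out : Int) : Decidable (Spec_findDupSearch2 lst out) := by unfold Spec_findDupSearch2; infer_instance

-- ===== CLAIM (what is proved, stated in full; the proofs are below) =====
def Claim_equal_findDupSearch2 : Prop := ∀ (lst : List Int), Dom_findDupSearch2 lst → Spec_findDupSearch2 lst (findDupSearch2 lst)

-- ===== LEMMAS AND PROOFS =====

-- recursive count of elements with clamp(x) < k, proof-side only
def pvCC (n k : Int) : List Int → Int
  | [] => 0
  | x :: l => (if pvClamp n x < k then 1 else 0) + pvCC n k l

-- shift for the counting fold
theorem pvCountLe_shift (mid : Int) : ∀ (l : List Int) (c : Int),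
    l.foldl (fun c x => if x ≤ mid then c + 1 else c) c = c + pvCountLe l mid := by
  intro l
  induction l with
  | nil => intro c; simp [pvCountLe]
  | cons a t ih =>
      intro c
      simp only [List.foldl_cons]
      rw [ih, show pvCountLe (a :: t) mid
        = t.foldl (fun c x => if x ≤ mid then c + 1 else c) (if a ≤ mid then 0 + 1 else 0)
        from rfl, ih (if a ≤ mid then 0 + 1 else 0)]
      by_cases h : a ≤ mid <;> simp [h, add_comm, add_left_comm]

theorem pvCountLe_cons (x mid : Int) (l : List Int) :
    pvCountLe (x :: l) mid = (if x ≤ mid then 1 else 0) + pvCountLe l mid := by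
  show (x :: l).foldl (fun c x => if x ≤ mid then c + 1 else c) 0 = _
  simp only [List.foldl_cons]
  rw [pvCountLe_shift mid l (if x ≤ mid then 0 + 1 else 0)]
  by_cases h : x ≤ mid <;> simp [h]

-- set-take-sum lemma
theorem pvSetTakeSum : ∀ (h : List Int) (j k : Nat), j < h.length →
    ((h.set j (h.getD j 0 + 1)).take k).sum
      = (h.take k).sum + (if j < k then 1 else 0) := by
  intro h
  induction h with
  | nil => intro j k hj; simp at hj
  | cons a t ih =>
      intro j k hj
      cases j with
      | zero =>
          cases k with
          | zero => simp
          | succ m => simp [List.take_succ_cons]; ring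
      | succ i =>
          cases k with
          | zero => simp
          | succ m =>
              simp only [List.set_cons_succ, List.take_succ_cons, List.sum_cons,
                List.getD_cons_succ]
              rw [ih i m (by simpa using hj)]
              by_cases h2 : i < m
              · rw [if_pos h2, if_pos (Nat.succ_lt_succ h2)]; ring
              · rw [if_neg h2, if_neg (fun hh => h2 (Nat.lt_of_succ_lt_succ hh))]; ring

theorem pvClamp_toNat_lt (n x : Int) (L : Nat) (hn : 0 ≤ n) (hL : n < (L : Int)) :
    (pvClamp n x).toNat < L := by
  unfold pvClamp
  split_ifs <;> omega

-- the histogram fold, take-sum invariant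
theorem pvHistSum (n : Int) (hn : 0 ≤ n) :
    ∀ (l : List Int) (h : List Int) (k : Nat),
    n < (h.length : Int) →
    (((l.foldl (fun h x =>
        let b := (pvClamp n x).toNat
        h.set b (h.getD b 0 + 1)) h)).take k).sum
      = (h.take k).sum + pvCC n (k : Int) l := by
  intro l
  induction l with
  | nil => intro h k _; simp [pvCC]
  | cons a t ih =>
      intro h k hL
      simp only [List.foldl_cons]
      rw [ih _ k (by simpa using hL)]
      rw [pvSetTakeSum h (pvClamp n a).toNat k
        (pvClamp_toNat_lt n a h.length hn hL)]
      have hcl : 0 ≤ pvClamp n a := by unfold pvClamp; split_ifs <;> omega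
      have : ((pvClamp n a).toNat < k) ↔ (pvClamp n a < (k : Int)) := by omega
      simp only [pvCC]
      by_cases hc : pvClamp n a < (k : Int)
      · rw [if_pos hc, if_pos (this.mpr hc)]; ring
      · rw [if_neg hc, if_neg (fun hh => hc (this.mp hh))]; ring

-- closed form of the prefix-sum fold
def pvScan (s : Int) : List Int → List Int
  | [] => []
  | a :: t => (s + a) :: pvScan (s + a) t

theorem pvPrefFold_eq : ∀ (h : List Int) (p : List Int) (s : Int),
    h.foldl (fun ps h => (ps.1 ++ [ps.2 + h], ps.2 + h)) (p, s)
      = (p ++ pvScan s h, s + h.sum) := by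
  intro h
  induction h with
  | nil => intro p s; simp [pvScan]
  | cons a t ih =>
      intro p s
      simp only [List.foldl_cons, pvScan]
      rw [ih]
      simp [List.append_assoc]
      ring

theorem pvScan_getD : ∀ (h : List Int) (s : Int) (j : Nat), j < h.length →
    (pvScan s h).getD j 0 = s + (h.take (j + 1)).sum := by
  intro h
  induction h with
  | nil => intro s j hj; simp at hj
  | cons a t ih =>
      intro s j hj
      cases j with
      | zero => simp [pvScan]
      | succ m =>
          simp only [pvScan, List.getD_cons_succ, List.take_succ_cons, List.sum_cons]
          rw [ih (s + a) m (by simpa using hj)]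
          ring

theorem pvHistFold_length (n : Int) : ∀ (l : List Int) (h : List Int),
    (l.foldl (fun h x =>
        let b := (pvClamp n x).toNat
        h.set b (h.getD b 0 + 1)) h).length = h.length := by
  intro l
  induction l with
  | nil => intro h; rfl
  | cons a t ih => intro h; simp only [List.foldl_cons]; rw [ih]; simp

theorem pvHist_length (lst : List Int) : (pvHist lst).length = lst.length + 1 := by
  unfold pvHist
  rw [pvHistFold_length]
  simp

theorem pvScan_length : ∀ (h : List Int) (s : Int), (pvScan s h).length = h.length := by
  intro h
  induction h with
  | nil => intro s; rfl
  | cons a t ih => intro s; simp [pvScan, ih]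

-- clamp agrees with ≤ on mids below n
theorem pvClamp_le_iff (n x mid : Int) (h0 : 0 ≤ mid) (h1 : mid ≤ n - 1) :
    (pvClamp n x < mid + 1) ↔ (x ≤ mid) := by
  unfold pvClamp; split_ifs <;> omega

theorem pvCC_eq_countLe (n mid : Int) (h0 : 0 ≤ mid) (h1 : mid ≤ n - 1) :
    ∀ l : List Int, pvCC n (mid + 1) l = pvCountLe l mid := by
  intro l
  induction l with
  | nil => simp [pvCC, pvCountLe]
  | cons a t ih =>
      rw [pvCountLe_cons, show pvCC n (mid + 1) (a :: t)
        = (if pvClamp n a < mid + 1 then 1 else 0) + pvCC n (mid + 1) t from rfl, ih]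
      by_cases hc : a ≤ mid
      · rw [if_pos ((pvClamp_le_iff n a mid h0 h1).mpr hc), if_pos hc]
      · rw [if_neg (fun hh => hc ((pvClamp_le_iff n a mid h0 h1).mp hh)), if_neg hc]

-- the central count identity: pref[mid] = count of x ≤ mid, for mid ∈ [0, n-1]
theorem pvCountEq (lst : List Int) (mid : Int) (h0 : 0 ≤ mid)
    (h1 : mid ≤ (lst.length : Int) - 1) :
    PySem.List.pyGetD (pvPref (pvHist lst)).1 mid 0 = pvCountLe lst mid := by
  have hHL : (pvHist lst).length = lst.length + 1 := pvHist_length lst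
  have hpref : (pvPref (pvHist lst)).1 = pvScan 0 (pvHist lst) := by
    unfold pvPref
    rw [pvPrefFold_eq]
    simp
  have hPL : ((pvPref (pvHist lst)).1).length = lst.length + 1 := by
    rw [hpref, pvScan_length, hHL]
  have hlt : mid < (((pvPref (pvHist lst)).1).length : Int) := by
    rw [hPL]; omega
  rw [PySem.List.pyGetD_eq_getElem _ _ h0 hlt]
  have hlt' : mid.toNat < ((pvPref (pvHist lst)).1).length := by omega
  rw [← List.getD_eq_getElem ((pvPref (pvHist lst)).1) 0 hlt']
  rw [hpref] at hlt' ⊢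
  rw [pvScan_getD (pvHist lst) 0 mid.toNat (by rwa [pvScan_length] at hlt')]
  have := pvHistSum (lst.length : Int) (by positivity) lst
    (List.replicate (lst.length + 1) 0) (mid.toNat + 1) (by simp)
  unfold pvHist
  rw [this]
  have hz : ((List.replicate (lst.length + 1) (0 : Int)).take (mid.toNat + 1)).sum = 0 := by
    simp [List.take_replicate]
  rw [hz]
  have hcast : ((mid.toNat + 1 : Nat) : Int) = mid + 1 := by omega
  rw [hcast, pvCC_eq_countLe (lst.length : Int) mid h0 h1]
  ring

theorem pvLoopEq (lst : List Int) :
    ∀ (fuel : Nat) (start finish out : Int), 1 ≤ start → finish ≤ (lst.length : Int) - 1 →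
    pvLoopA lst fuel start finish out
      = pvLoopB (pvPref (pvHist lst)).1 fuel start finish out := by
  intro fuel
  induction fuel with
  | zero => intro start finish out _ _; rfl
  | succ f ih =>
      intro start finish out hs hf
      simp only [pvLoopA, pvLoopB]
      by_cases hle : start ≤ finish
      · simp only [if_pos hle]
        have hmid := PySem.Int.floordiv_two_mid_bounds hle
        set mid := PySem.Int.floordiv (start + finish) 2 with hm
        rw [pvCountEq lst mid (by omega) (by omega)]
        by_cases hc : pvCountLe lst mid > mid
        · rw [if_pos hc, if_pos hc]
          exact ih start (mid - 1) mid hs (by omega)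
        · rw [if_neg hc, if_neg hc]
          exact ih (mid + 1) finish out (by omega) hf
      · simp [if_neg hle]

-- ===== VERDICT (by name: the statement is the Claim_ definition above) =====
theorem findDupSearch2_spec : Claim_equal_findDupSearch2 := by
  intro lst _
  unfold Spec_findDupSearch2 findDupSearch2 findDupSearch2_alt
  exact pvLoopEq lst (lst.length + 1) 1 ((lst.length : Int) - 1) (-1) le_rfl le_rfl
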